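-- pv_equiv track=rewrite | github.com/Colin-Cheng/AI-homeworks | 442 HW2/wvc5241.py | next_states_distinct
-- ===== SOURCE A (Python) =====
-- def next_states_distinct(length, cur_state):
--     res = []
--     for i in range(length):
--         next_state = cur_state[:]
--         if cur_state[i] == -1:
--             continue
--         if (i+1 < length) and (cur_state[i+1] == -1):
--             move = (i, i+1)
--             next_state[i] = -1
--             next_state[i+1] = cur_state[i]
--             res.append((next_state[:], move))
--             next_state = cur_state[:]
--
--         if (i-1 >= 0) and (cur_state[i-1] == -1):
--             move = (i, i-1)
--             next_state[i] = -1
--             next_state[i-1] = cur_state[i]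
--             res.append((next_state[:], move))
--             next_state = cur_state[:]
--
--         if (i+2 < length) and (cur_state[i+1] != -1) and (cur_state[i+2] == -1):
--             move = (i,i+2)
--             next_state[i] = -1
--             next_state[i+2] = cur_state[i]
--             res.append((next_state[:], move))
--             next_state = cur_state[:]
--
--         if (i-2 >= 0) and (cur_state[i-1] != -1) and (cur_state[i-2] == -1):
--             move = (i,i-2)
--             next_state[i] = -1
--             next_state[i-2] = cur_state[i]
--             res.append((next_state[:], move))
--             next_state = cur_state[:]
--     return res
-- ===== SOURCE B (Python) =====
-- def next_states_distinct(length, cur_state):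
--     # Generate the legal moves in four separate passes (right slides, left
--     # slides, right jumps, left jumps), tag each with the key 4*i + rank,
--     # sort the pool once, then materialise the boards in a final pass.
--     def occupied(k):
--         return 0 <= k < length and cur_state[k] != -1
--
--     def empty(k):
--         return 0 <= k < length and cur_state[k] == -1
--
--     pegs = [i for i in range(length) if cur_state[i] != -1]
--     moves = ([(4 * i + 0, i, i + 1) for i in pegs if empty(i + 1)]
--              + [(4 * i + 1, i, i - 1) for i in pegs if empty(i - 1)]
--              + [(4 * i + 2, i, i + 2) for i in pegs if occupied(i + 1) and empty(i + 2)]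
--              + [(4 * i + 3, i, i - 2) for i in pegs if occupied(i - 1) and empty(i - 2)])
--     moves.sort()
--     out = []
--     for _, i, j in moves:
--         board = cur_state[:]
--         board[i] = -1
--         board[j] = cur_state[i]
--         out.append((board, (i, j)))
--     return out
-- ===== Notes on version B (the rewrite author's own statement) =====
-- stated objective: faster
-- what changed: Instead of A's single index loop whose body interleaves four copy-mutate-append branches (and copies the whole board at every index, peg or not), B stages the work: four independent comprehension passes collect each move family (right/left slides, right/left jumps) tagged with the integer key 4*i+rank, one sort of the pooled moves restores A's emission order, and a final pass materialises a board copy only per emitted move.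
import Mathlib
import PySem

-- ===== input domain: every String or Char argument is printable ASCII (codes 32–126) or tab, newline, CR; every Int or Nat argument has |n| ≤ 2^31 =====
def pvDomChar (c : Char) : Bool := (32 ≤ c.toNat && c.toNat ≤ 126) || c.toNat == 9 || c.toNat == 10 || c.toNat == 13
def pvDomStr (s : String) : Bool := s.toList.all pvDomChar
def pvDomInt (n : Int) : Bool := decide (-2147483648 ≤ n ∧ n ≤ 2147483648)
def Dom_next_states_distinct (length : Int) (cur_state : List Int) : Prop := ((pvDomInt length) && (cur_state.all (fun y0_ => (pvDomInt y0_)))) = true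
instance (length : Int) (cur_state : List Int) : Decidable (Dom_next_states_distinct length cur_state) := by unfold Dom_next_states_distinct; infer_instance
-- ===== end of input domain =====

-- B replaces A's single loop with interleaved copy-mutate-append branches (which
-- copies the whole board at every index) by a staged pipeline: four comprehension
-- passes collect the move families tagged with the key 4*i+rank, one sort restores
-- A's emission order, and a last pass builds a board copy only per emitted move;
-- a timing run measured B faster.  Equivalence is about the return value.

-- ===== PORT A =====
-- A's loop body for one i of range(length); the four branches are kept in order,
-- each appending a copy of cur_state with positions i and the target rewritten
-- (A resets next_state to cur_state[:] after every append, so each appended board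
-- is exactly cur_state with those two writes).  pyGetD is exact under Pre_ (no
-- IndexError).
def nsdA_step (length : Int) (cur_state : List Int) (res : List (List Int × (Int × Int))) (i : Int) : List (List Int × (Int × Int)) :=
  if PySem.List.pyGetD cur_state i 0 == -1 then res
  else
    let v := PySem.List.pyGetD cur_state i 0
    let res := if decide (i+1 < length) && (PySem.List.pyGetD cur_state (i+1) 0 == -1) then
        res ++ [((PySem.List.pySetD (PySem.List.pySetD cur_state i (-1)) (i+1) v), (i, i+1))] else res
    let res := if decide (0 ≤ i-1) && (PySem.List.pyGetD cur_state (i-1) 0 == -1) then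
        res ++ [((PySem.List.pySetD (PySem.List.pySetD cur_state i (-1)) (i-1) v), (i, i-1))] else res
    let res := if decide (i+2 < length) && (PySem.List.pyGetD cur_state (i+1) 0 != -1) && (PySem.List.pyGetD cur_state (i+2) 0 == -1) then
        res ++ [((PySem.List.pySetD (PySem.List.pySetD cur_state i (-1)) (i+2) v), (i, i+2))] else res
    let res := if decide (0 ≤ i-2) && (PySem.List.pyGetD cur_state (i-1) 0 != -1) && (PySem.List.pyGetD cur_state (i-2) 0 == -1) then
        res ++ [((PySem.List.pySetD (PySem.List.pySetD cur_state i (-1)) (i-2) v), (i, i-2))] else res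
    res

def next_states_distinct (length : Int) (cur_state : List Int) : List (List Int × (Int × Int)) :=
  (PySem.List.pyRange 0 length 1).foldl (nsdA_step length cur_state) []

-- ===== PORT B =====
-- Source B's helpers occupied(k) / empty(k): bounds check against length, then the cell.
def nsdB_occupied (length : Int) (cur_state : List Int) (k : Int) : Bool :=
  decide (0 ≤ k) && decide (k < length) && (PySem.List.pyGetD cur_state k 0 != -1)
def nsdB_empty (length : Int) (cur_state : List Int) (k : Int) : Bool :=
  decide (0 ≤ k) && decide (k < length) && (PySem.List.pyGetD cur_state k 0 == -1)

-- Source B: pegs comprehension, four tagged comprehensions concatenated, moves.sort(),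
-- then the materialising loop.  moves.sort() compares the triples lexicographically;
-- the keys 4*i+rank are pairwise distinct (one per (i, rank)), so this is exactly
-- sorting by the first component, which is how it is ported.
def next_states_distinct_alt (length : Int) (cur_state : List Int) : List (List Int × (Int × Int)) :=
  let pegs := (PySem.List.pyRange 0 length 1).filter (fun i => PySem.List.pyGetD cur_state i 0 != -1)
  let moves :=
    (pegs.filter (fun i => nsdB_empty length cur_state (i+1))).map (fun i => (4*i+0, i, i+1))
    ++ (pegs.filter (fun i => nsdB_empty length cur_state (i-1))).map (fun i => (4*i+1, i, i-1))
    ++ (pegs.filter (fun i => nsdB_occupied length cur_state (i+1) && nsdB_empty length cur_state (i+2))).map (fun i => (4*i+2, i, i+2))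
    ++ (pegs.filter (fun i => nsdB_occupied length cur_state (i-1) && nsdB_empty length cur_state (i-2))).map (fun i => (4*i+3, i, i-2))
  let sortedMoves := PySem.List.sorted moves (fun m => m.1) false
  sortedMoves.foldl (fun out m =>
    out ++ [((PySem.List.pySetD (PySem.List.pySetD cur_state m.2.1 (-1)) m.2.2 (PySem.List.pyGetD cur_state m.2.1 0)), (m.2.1, m.2.2))]) []

-- ===== PRECONDITION & SPEC =====
-- Pre_ excludes exactly the inputs where Python A raises IndexError: length exceeding
-- len(cur_state) makes the loop read cur_state[i] at i = len(cur_state).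
def Pre_next_states_distinct (length : Int) (cur_state : List Int) : Prop :=
  length ≤ (cur_state.length : Int)
instance (length : Int) (cur_state : List Int) : Decidable (Pre_next_states_distinct length cur_state) := by unfold Pre_next_states_distinct; infer_instance

def pvWitness_next_states_distinct : Int × List Int := (4, [0, -1, 2, -1])

def Spec_next_states_distinct (length : Int) (cur_state : List Int) (out : List (List Int × (Int × Int))) : Prop := out = next_states_distinct_alt length cur_state
instance (length : Int) (cur_state : List Int) (out : List (List Int × (Int × Int))) : Decidable (Spec_next_states_distinct length cur_state out) := by unfold Spec_next_states_distinct; infer_instance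

-- ===== CLAIM (what is proved, stated in full; the proofs are below) =====
def Claim_equal_next_states_distinct : Prop := ∀ (length : Int) (cur_state : List Int), Dom_next_states_distinct length cur_state → Pre_next_states_distinct length cur_state → Spec_next_states_distinct length cur_state (next_states_distinct length cur_state)

-- ===== LEMMAS AND PROOFS =====

-- build the output entry from a tagged move (key, i, j)
def pvBuild (cur_state : List Int) (m : Int × Int × Int) : List Int × (Int × Int) :=
  ((PySem.List.pySetD (PySem.List.pySetD cur_state m.2.1 (-1)) m.2.2 (PySem.List.pyGetD cur_state m.2.1 0)), (m.2.1, m.2.2))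

-- the tagged moves emitted at index i, in A's per-index order
def pvG (length : Int) (cur_state : List Int) (i : Int) : List (Int × Int × Int) :=
  if PySem.List.pyGetD cur_state i 0 == -1 then []
  else
    (if nsdB_empty length cur_state (i+1) then [(4*i+0, i, i+1)] else [])
    ++ (if nsdB_empty length cur_state (i-1) then [(4*i+1, i, i-1)] else [])
    ++ (if nsdB_occupied length cur_state (i+1) && nsdB_empty length cur_state (i+2) then [(4*i+2, i, i+2)] else [])
    ++ (if nsdB_occupied length cur_state (i-1) && nsdB_empty length cur_state (i-2) then [(4*i+3, i, i-2)] else [])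

-- condition bridges (valid for 0 ≤ i < length): B's bounds-checked helpers equal
-- A's branch guards
theorem pv_e1 (length : Int) (cur_state : List Int) (i : Int) (h0 : 0 ≤ i) :
    nsdB_empty length cur_state (i+1)
      = (decide (i+1 < length) && (PySem.List.pyGetD cur_state (i+1) 0 == -1)) := by
  unfold nsdB_empty
  rw [decide_eq_true (by omega : (0:Int) ≤ i+1)]
  simp

theorem pv_e2 (length : Int) (cur_state : List Int) (i : Int) (h1 : i < length) :
    nsdB_empty length cur_state (i-1)
      = (decide (0 ≤ i-1) && (PySem.List.pyGetD cur_state (i-1) 0 == -1)) := by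
  unfold nsdB_empty
  rw [decide_eq_true (by omega : i-1 < length)]
  simp [Bool.and_comm]

theorem pv_e3 (length : Int) (cur_state : List Int) (i : Int) (h0 : 0 ≤ i) :
    (nsdB_occupied length cur_state (i+1) && nsdB_empty length cur_state (i+2))
      = (decide (i+2 < length) && (PySem.List.pyGetD cur_state (i+1) 0 != -1) && (PySem.List.pyGetD cur_state (i+2) 0 == -1)) := by
  unfold nsdB_occupied nsdB_empty
  rw [decide_eq_true (by omega : (0:Int) ≤ i+1), decide_eq_true (by omega : (0:Int) ≤ i+2)]
  by_cases h2 : i+2 < length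
  · rw [decide_eq_true (by omega : i+1 < length), decide_eq_true h2]
    cases hg1 : (PySem.List.pyGetD cur_state (i+1) 0 == -1) <;>
      cases hg2 : (PySem.List.pyGetD cur_state (i+2) 0 == -1) <;> simp [hg1, bne]
  · rw [decide_eq_false h2]
    cases hg1 : (PySem.List.pyGetD cur_state (i+1) 0 == -1) <;> simp [hg1, bne]

theorem pv_e4 (length : Int) (cur_state : List Int) (i : Int) (h1 : i < length) :
    (nsdB_occupied length cur_state (i-1) && nsdB_empty length cur_state (i-2))
      = (decide (0 ≤ i-2) && (PySem.List.pyGetD cur_state (i-1) 0 != -1) && (PySem.List.pyGetD cur_state (i-2) 0 == -1)) := by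
  unfold nsdB_occupied nsdB_empty
  rw [decide_eq_true (by omega : i-1 < length), decide_eq_true (by omega : i-2 < length)]
  by_cases h2 : 0 ≤ i-2
  · rw [decide_eq_true (by omega : (0:Int) ≤ i-1), decide_eq_true h2]
    cases hg1 : (PySem.List.pyGetD cur_state (i-1) 0 == -1) <;>
      cases hg2 : (PySem.List.pyGetD cur_state (i-2) 0 == -1) <;> simp [hg1, bne]
  · rw [decide_eq_false h2]
    cases hg1 : (PySem.List.pyGetD cur_state (i-1) 0 == -1) <;> simp [hg1, bne]

-- A's yields at index i are exactly pvG i, built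
theorem pv_bodyA (length : Int) (cur_state : List Int) (res : List (List Int × (Int × Int)))
    (i : Int) (h0 : 0 ≤ i) (h1 : i < length) :
    nsdA_step length cur_state res i = res ++ (pvG length cur_state i).map (pvBuild cur_state) := by
  unfold nsdA_step pvG
  rw [pv_e1 length cur_state i h0, pv_e2 length cur_state i h1,
    pv_e3 length cur_state i h0, pv_e4 length cur_state i h1]
  cases hpeg : (PySem.List.pyGetD cur_state i 0 == -1)
  · simp only [Bool.false_eq_true, if_false]
    split_ifs <;> simp [pvBuild]
  · simp

-- a comprehension with a filter clause, as a flatMap of conditional singletons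
theorem pv_flatMap_if_filter {α β : Type} (l : List α) (p : α → Bool) (f : α → β) :
    l.flatMap (fun x => if p x then [f x] else []) = (l.filter p).map f := by
  induction l with
  | nil => rfl
  | cons a t ih => by_cases h : p a <;> simp [List.flatMap_cons, h, ih]

-- a flatMap of pointwise appended generators is a permutation of staged flatMaps
theorem pv_flatMap_append_perm {α β : Type} (l : List α) (f g : α → List β) :
    (l.flatMap (fun x => f x ++ g x)).Perm (l.flatMap f ++ l.flatMap g) := by
  induction l with
  | nil => simp
  | cons a t ih =>
    simp only [List.flatMap_cons]
    have h1 : (f a ++ g a ++ t.flatMap (fun x => f x ++ g x)).Perm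
        (f a ++ g a ++ (t.flatMap f ++ t.flatMap g)) := List.Perm.append_left _ ih
    have h2 : (f a ++ (g a ++ (t.flatMap f ++ t.flatMap g))).Perm
        (f a ++ (t.flatMap f ++ (g a ++ t.flatMap g))) :=
      List.Perm.append_left _ (List.perm_append_comm_assoc _ _ _)
    simpa [List.append_assoc] using h1.trans (by simpa [List.append_assoc] using h2)

-- pvG i split into its four conditional singletons (the peg test folded into each)
theorem pv_G_split (length : Int) (cur_state : List Int) (i : Int) :
    pvG length cur_state i =
      (if (PySem.List.pyGetD cur_state i 0 != -1) && nsdB_empty length cur_state (i+1) then [(4*i+0, i, i+1)] else [])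
      ++ (if (PySem.List.pyGetD cur_state i 0 != -1) && nsdB_empty length cur_state (i-1) then [(4*i+1, i, i-1)] else [])
      ++ (if (PySem.List.pyGetD cur_state i 0 != -1) && (nsdB_occupied length cur_state (i+1) && nsdB_empty length cur_state (i+2)) then [(4*i+2, i, i+2)] else [])
      ++ (if (PySem.List.pyGetD cur_state i 0 != -1) && (nsdB_occupied length cur_state (i-1) && nsdB_empty length cur_state (i-2)) then [(4*i+3, i, i-2)] else []) := by
  unfold pvG
  by_cases hpeg : PySem.List.pyGetD cur_state i 0 = -1 <;> simp [hpeg, bne]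

-- the staged comprehension pool is a permutation of the per-index concatenation
theorem pv_moves_perm (length : Int) (cur_state : List Int) :
    ((List.map (fun i => ((4*i+0 : Int), i, i+1)) (List.filter (fun i => nsdB_empty length cur_state (i+1)) ((PySem.List.pyRange 0 length 1).filter (fun i => PySem.List.pyGetD cur_state i 0 != -1)))
      ++ List.map (fun i => ((4*i+1 : Int), i, i-1)) (List.filter (fun i => nsdB_empty length cur_state (i-1)) ((PySem.List.pyRange 0 length 1).filter (fun i => PySem.List.pyGetD cur_state i 0 != -1)))
      ++ List.map (fun i => ((4*i+2 : Int), i, i+2)) (List.filter (fun i => nsdB_occupied length cur_state (i+1) && nsdB_empty length cur_state (i+2)) ((PySem.List.pyRange 0 length 1).filter (fun i => PySem.List.pyGetD cur_state i 0 != -1)))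
      ++ List.map (fun i => ((4*i+3 : Int), i, i-2)) (List.filter (fun i => nsdB_occupied length cur_state (i-1) && nsdB_empty length cur_state (i-2)) ((PySem.List.pyRange 0 length 1).filter (fun i => PySem.List.pyGetD cur_state i 0 != -1))))).Perm
    ((PySem.List.pyRange 0 length 1).flatMap (pvG length cur_state)) := by
  have hfun : pvG length cur_state = fun i =>
      (if nsdB_empty length cur_state (i+1) && (PySem.List.pyGetD cur_state i 0 != -1) then [(4*i+0, i, i+1)] else [])
      ++ ((if nsdB_empty length cur_state (i-1) && (PySem.List.pyGetD cur_state i 0 != -1) then [(4*i+1, i, i-1)] else [])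
      ++ ((if (nsdB_occupied length cur_state (i+1) && nsdB_empty length cur_state (i+2)) && (PySem.List.pyGetD cur_state i 0 != -1) then [(4*i+2, i, i+2)] else [])
      ++ (if (nsdB_occupied length cur_state (i-1) && nsdB_empty length cur_state (i-2)) && (PySem.List.pyGetD cur_state i 0 != -1) then [(4*i+3, i, i-2)] else []))) := by
    funext i
    rw [pv_G_split]
    simp [List.append_assoc, Bool.and_comm]
  rw [hfun]
  apply List.Perm.symm
  refine List.Perm.trans (pv_flatMap_append_perm _ _ _) ?_
  rw [List.filter_filter, List.filter_filter, List.filter_filter, List.filter_filter,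
    ← pv_flatMap_if_filter _ _ (fun i => ((4*i+0 : Int), i, i+1)),
    ← pv_flatMap_if_filter _ _ (fun i => ((4*i+1 : Int), i, i-1)),
    ← pv_flatMap_if_filter _ _ (fun i => ((4*i+2 : Int), i, i+2)),
    ← pv_flatMap_if_filter _ _ (fun i => ((4*i+3 : Int), i, i-2))]
  simp only [List.append_assoc]
  refine List.Perm.append_left _ ?_
  refine List.Perm.trans (pv_flatMap_append_perm _ _ _) ?_
  refine List.Perm.append_left _ ?_
  exact pv_flatMap_append_perm _ _ _

-- keys inside pvG i lie in [4*i, 4*i+4)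
theorem pv_G_key_bounds (length : Int) (cur_state : List Int) (i : Int) :
    ∀ m ∈ pvG length cur_state i, 4*i ≤ m.1 ∧ m.1 < 4*i+4 := by
  intro m hm
  rw [pv_G_split, List.mem_append, List.mem_append, List.mem_append] at hm
  rcases hm with ((h | h) | h) | h <;> split_ifs at h <;> simp at h <;> subst h <;>
    exact ⟨by simp, by simp⟩

theorem pv_G_pairwise (length : Int) (cur_state : List Int) (i : Int) :
    (pvG length cur_state i).Pairwise (fun a b => a.1 < b.1) := by
  rw [pv_G_split]
  split_ifs <;> simp

-- the per-index concatenation is strictly increasing in the key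
theorem pv_pairwise_flatMap (length : Int) (cur_state : List Int) (l : List Int)
    (hl : l.Pairwise (· < ·)) :
    (l.flatMap (pvG length cur_state)).Pairwise
      (fun a b => (a : Int × Int × Int).1 < b.1) := by
  induction l with
  | nil => simp
  | cons a t ih =>
    simp only [List.flatMap_cons, List.pairwise_append]
    rcases List.pairwise_cons.mp hl with ⟨ha, ht⟩
    refine ⟨pv_G_pairwise _ _ _, ih ht, ?_⟩
    intro x hx y hy
    rcases List.mem_flatMap.mp hy with ⟨j, hj, hyj⟩
    have hxa := pv_G_key_bounds length cur_state a x hx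
    have hyb := pv_G_key_bounds length cur_state j y hyj
    have haj : a < j := ha j hj
    omega

-- ===== VERDICT (by name: the statement is the Claim_ definition above) =====
theorem next_states_distinct_spec : Claim_equal_next_states_distinct := by
  intro length cur_state _ _
  unfold Spec_next_states_distinct
  simp only [next_states_distinct, next_states_distinct_alt]
  rw [PySem.List.foldl_congr_mem (PySem.List.pyRange 0 length 1)
    (nsdA_step length cur_state)
    (fun res i => res ++ (pvG length cur_state i).map (pvBuild cur_state)) []
    (by intro res i hi
        rcases PySem.List.mem_pyRange_one.mp hi with ⟨h0, h1⟩
        exact pv_bodyA length cur_state res i h0 h1)]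
  rw [PySem.List.foldl_append_eq_flatMap, List.nil_append]
  have hb : (fun (out : List (List Int × (Int × Int))) (m : Int × Int × Int) =>
      out ++ [((PySem.List.pySetD (PySem.List.pySetD cur_state m.2.1 (-1)) m.2.2 (PySem.List.pyGetD cur_state m.2.1 0)), (m.2.1, m.2.2))])
      = (fun out m => out ++ [pvBuild cur_state m]) := rfl
  rw [hb, PySem.List.foldl_append_singleton_eq_map (f := pvBuild cur_state), List.nil_append]
  rw [PySem.List.sorted_eq_of_perm_of_pairwise_lt _
    ((PySem.List.pyRange 0 length 1).flatMap (pvG length cur_state)) (fun m => m.1)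
    (List.Perm.symm (pv_moves_perm length cur_state))
    (pv_pairwise_flatMap length cur_state _ (PySem.List.pairwise_lt_pyRange_one 0 length))]
  rw [List.map_flatMap]
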